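-- pv_equiv track=rewrite | github.com/hell-of-sloth/hell-of-sloth-PS | junyoung/프로그래머스/피로도.py | solution
-- ===== SOURCE A (Python) =====
-- from itertools import permutations
--
-- def solution(k, dungeons):
--
--     per = list(permutations(dungeons, len(dungeons)))
--
--     max_value = 0
--
--     for route in per:
--         temp_k = k
--         val = 0
--         for i in route:
--             if temp_k <= 0:
--                 max_value = max(max_value, val)
--                 break
--             if temp_k >= i[0]:
--                 temp_k -= i[1]
--                 val += 1
--
--         max_value = max(max_value, val)
--
--     return max_value
-- ===== SOURCE B (Python) =====
-- def picks(rem):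
--     # all ways to pick one element: (picked, rest-in-original-order)
--     if not rem:
--         return []
--     x, xs = rem[0], rem[1:]
--     return [(x, xs)] + [(y, [x] + ys) for (y, ys) in picks(xs)]
--
-- def solution(k, dungeons):
--     # depth-first search over which clearable dungeon to attempt next,
--     # instead of simulating every permutation of the full list
--     def best(fatigue, rem):
--         res = 0
--         for d, rest in picks(rem):
--             if fatigue > 0 and fatigue >= d[0]:
--                 res = max(res, 1 + best(fatigue - d[1], rest))
--         return res
--     return best(k, dungeons)
-- ===== Notes on version B (the rewrite author's own statement) =====
-- stated objective: faster
-- what changed: Replaced the enumerate-all-permutations-and-simulate-with-skips loop by a depth-first search that only branches on dungeons clearable at the current fatigue (pick-one-and-recurse on the remaining list), so unclearable orders are pruned instead of simulated.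
import Mathlib
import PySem

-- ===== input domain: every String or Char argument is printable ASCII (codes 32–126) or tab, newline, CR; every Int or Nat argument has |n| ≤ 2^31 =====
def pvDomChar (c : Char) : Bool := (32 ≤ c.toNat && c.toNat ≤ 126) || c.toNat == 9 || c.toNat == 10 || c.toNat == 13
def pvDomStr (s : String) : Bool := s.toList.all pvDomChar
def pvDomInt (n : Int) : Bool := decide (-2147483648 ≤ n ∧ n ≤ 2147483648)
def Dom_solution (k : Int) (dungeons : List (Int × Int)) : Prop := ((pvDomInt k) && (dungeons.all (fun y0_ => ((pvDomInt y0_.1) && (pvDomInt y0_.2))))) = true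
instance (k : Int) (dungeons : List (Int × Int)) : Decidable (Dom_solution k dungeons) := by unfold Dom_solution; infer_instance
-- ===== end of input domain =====

-- B replaces A's enumerate-all-permutations-and-simulate loop by a depth-first search
-- that only branches on currently clearable dungeons (objective: faster in practice).


-- ===== PORT A =====
-- inner `for i in route` loop: state (temp_k, val, done); the break sets done;
-- `max_value = max(max_value, val)` at the break and after the loop coincide (val unchanged)
def stepA (st : Int × Int × Bool) (i : Int × Int) : Int × Int × Bool :=
  if st.2.2 then st
  else if st.1 ≤ 0 then (st.1, st.2.1, true)
  else if st.1 ≥ i.1 then (st.1 - i.2, st.2.1 + 1, st.2.2)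
  else st

def solution (k : Int) (dungeons : List (Int × Int)) : Int :=
  let per := dungeons.permutations
  per.foldl (fun max_value route =>
    let s := route.foldl stepA (k, 0, false)
    max max_value s.2.1) 0

-- ===== PORT B =====
-- Source B's picks: all ways to pick one element, (picked, rest-in-original-order)
def picksB (rem : List (Int × Int)) : List ((Int × Int) × List (Int × Int)) :=
  match rem with
  | [] => []
  | x :: xs => (x, xs) :: (picksB xs).map (fun p => (p.1, x :: p.2))

-- length of the rest (used only as the termination measure of bestB)
theorem picksB_length {p : (Int × Int) × List (Int × Int)} {rem : List (Int × Int)}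
    (h : p ∈ picksB rem) : p.2.length + 1 = rem.length := by
  induction rem generalizing p with
  | nil => simp [picksB] at h
  | cons x xs ih =>
    simp only [picksB, List.mem_cons, List.mem_map] at h
    rcases h with h | ⟨q, hq, rfl⟩
    · subst h; simp
    · have := ih hq; simp [List.length_cons]; omega

def bestB (fatigue : Int) (rem : List (Int × Int)) : Int :=
  (picksB rem).attach.foldl (fun res p =>
    if 0 < fatigue ∧ p.1.1.1 ≤ fatigue then
      max res (1 + bestB (fatigue - p.1.1.2) p.1.2)
    else res) 0
  termination_by rem.length
  decreasing_by
    have := picksB_length p.2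
    omega

def solution_alt (k : Int) (dungeons : List (Int × Int)) : Int :=
  bestB k dungeons

-- ===== PRECONDITION & SPEC =====
def Spec_solution (k : Int) (dungeons : List (Int × Int)) (out : Int) : Prop := out = solution_alt k dungeons
instance (k : Int) (dungeons : List (Int × Int)) (out : Int) : Decidable (Spec_solution k dungeons out) := by unfold Spec_solution; infer_instance

-- ===== CLAIM (what is proved, stated in full; the proofs are below) =====
def Claim_equal_solution : Prop := ∀ (k : Int) (dungeons : List (Int × Int)), Dom_solution k dungeons → Spec_solution k dungeons (solution k dungeons)

-- ===== LEMMAS AND PROOFS =====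

-- value of A's inner loop on a route, as a structural recursion
def playA (tk : Int) : List (Int × Int) → Int
  | [] => 0
  | d :: rest =>
    if tk ≤ 0 then 0
    else if tk ≥ d.1 then 1 + playA (tk - d.2) rest
    else playA tk rest

theorem playA_nonneg (tk : Int) (r : List (Int × Int)) : 0 ≤ playA tk r := by
  induction r generalizing tk with
  | nil => simp [playA]
  | cons d rest ih =>
    simp only [playA]
    split_ifs with h1 h2
    · omega
    · have := ih (tk - d.2); omega
    · exact ih tk

-- A's inner foldl, once broken, is constant
theorem loopA_done (tk v : Int) (r : List (Int × Int)) :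
    r.foldl stepA (tk, v, true) = (tk, v, true) := by
  induction r with
  | nil => rfl
  | cons d rest ih => simpa [stepA] using ih

-- A's inner foldl computes v + playA
theorem loopA_eq_playA (tk v : Int) (r : List (Int × Int)) :
    (r.foldl stepA (tk, v, false)).2.1 = v + playA tk r := by
  induction r generalizing tk v with
  | nil => simp [playA]
  | cons d rest ih =>
    simp only [List.foldl_cons]
    by_cases h1 : tk ≤ 0
    · rw [show stepA (tk, v, false) d = (tk, v, true) by simp [stepA, h1]]
      rw [loopA_done]
      simp [playA, h1]
    · by_cases h2 : tk ≥ d.1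
      · rw [show stepA (tk, v, false) d = (tk - d.2, v + 1, false) by simp [stepA, h1, h2]]
        rw [ih]
        simp only [playA, if_neg h1, if_pos h2]
        ring
      · rw [show stepA (tk, v, false) d = (tk, v, false) by simp [stepA, h1, h2]]
        rw [ih]
        simp [playA, h1, h2]

-- bestB unfolded (attach removed)
theorem bestB_eq (fatigue : Int) (rem : List (Int × Int)) :
    bestB fatigue rem = (picksB rem).foldl (fun res p =>
      if 0 < fatigue ∧ p.1.1 ≤ fatigue then
        max res (1 + bestB (fatigue - p.1.2) p.2)
      else res) 0 := by
  rw [bestB]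
  conv_rhs => rw [← List.attach_map_subtype_val (picksB rem), List.foldl_map]

-- the fold in bestB_eq only grows its accumulator
theorem foldB_mono (fatigue : Int) (l : List ((Int × Int) × List (Int × Int))) (a : Int) :
    a ≤ l.foldl (fun res p =>
      if 0 < fatigue ∧ p.1.1 ≤ fatigue then
        max res (1 + bestB (fatigue - p.1.2) p.2)
      else res) a := by
  induction l generalizing a with
  | nil => simp
  | cons p l ih =>
    simp only [List.foldl_cons]
    refine le_trans ?_ (ih _)
    split_ifs <;> simp

theorem bestB_nonneg (fatigue : Int) (rem : List (Int × Int)) : 0 ≤ bestB fatigue rem := by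
  rw [bestB_eq]; exact foldB_mono _ _ 0

-- a member with the condition bounds the fold from below
theorem foldB_ge (fatigue : Int) (l : List ((Int × Int) × List (Int × Int)))
    {p : (Int × Int) × List (Int × Int)} (hp : p ∈ l) (hc : 0 < fatigue ∧ p.1.1 ≤ fatigue) :
    ∀ (a : Int), 1 + bestB (fatigue - p.1.2) p.2 ≤ l.foldl (fun res p =>
      if 0 < fatigue ∧ p.1.1 ≤ fatigue then
        max res (1 + bestB (fatigue - p.1.2) p.2)
      else res) a := by
  induction l with
  | nil => simp at hp
  | cons q l ih =>
    intro a
    simp only [List.foldl_cons]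
    rcases List.mem_cons.mp hp with rfl | hp2
    · refine le_trans ?_ (foldB_mono _ _ _)
      simp [hc]
    · exact ih hp2 _

-- the fold's value is the initial value or one of the branch values
theorem foldB_cases (fatigue : Int) (l : List ((Int × Int) × List (Int × Int))) (a : Int) :
    l.foldl (fun res p =>
      if 0 < fatigue ∧ p.1.1 ≤ fatigue then
        max res (1 + bestB (fatigue - p.1.2) p.2)
      else res) a = a ∨
    ∃ p ∈ l, (0 < fatigue ∧ p.1.1 ≤ fatigue) ∧
      l.foldl (fun res p =>
        if 0 < fatigue ∧ p.1.1 ≤ fatigue then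
          max res (1 + bestB (fatigue - p.1.2) p.2)
        else res) a = 1 + bestB (fatigue - p.1.2) p.2 := by
  induction l generalizing a with
  | nil => left; rfl
  | cons q l ih =>
    simp only [List.foldl_cons]
    by_cases hc : 0 < fatigue ∧ q.1.1 ≤ fatigue
    · rw [if_pos hc]
      rcases ih (max a (1 + bestB (fatigue - q.1.2) q.2)) with h | ⟨p, hp, hpc, h⟩
      · rcases max_cases a (1 + bestB (fatigue - q.1.2) q.2) with ⟨he, _⟩ | ⟨he, _⟩
        · left; rw [h, he]
        · right; exact ⟨q, List.mem_cons_self, hc, by rw [h, he]⟩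
      · right; exact ⟨p, List.mem_cons_of_mem _ hp, hpc, h⟩
    · rw [if_neg hc]
      rcases ih a with h | ⟨p, hp, hpc, h⟩
      · left; exact h
      · right; exact ⟨p, List.mem_cons_of_mem _ hp, hpc, h⟩

-- membership in picksB: first occurrence pick gives erase
theorem picksB_of_mem {d : Int × Int} {l : List (Int × Int)} (h : d ∈ l) :
    (d, l.erase d) ∈ picksB l := by
  induction l with
  | nil => simp at h
  | cons x xs ih =>
    by_cases hx : x = d
    · subst hx
      simp [picksB, List.erase_cons_head]
    · rcases List.mem_cons.mp h with rfl | h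
      · exact absurd rfl hx
      · rw [List.erase_cons_tail (by simpa using hx)]
        exact List.mem_cons_of_mem _ (List.mem_map.mpr ⟨(d, xs.erase d), ih h, rfl⟩)

-- each pick reassembles to a permutation of the original list
theorem picksB_perm {p : (Int × Int) × List (Int × Int)} {l : List (Int × Int)}
    (h : p ∈ picksB l) : List.Perm (p.1 :: p.2) l := by
  induction l generalizing p with
  | nil => simp [picksB] at h
  | cons x xs ih =>
    simp only [picksB, List.mem_cons, List.mem_map] at h
    rcases h with h | ⟨q, hq, rfl⟩
    · subst h; exact List.Perm.refl _
    · exact ((List.Perm.swap _ _ _).trans ((ih hq).cons x))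

-- upper bound: any subpermutation route plays at most bestB
theorem playA_le_bestB (r : List (Int × Int)) : ∀ (l : List (Int × Int)) (k : Int),
    List.Subperm r l → playA k r ≤ bestB k l := by
  induction r with
  | nil => intro l k _; simpa [playA] using bestB_nonneg k l
  | cons d r' ih =>
    intro l k hsub
    have hd : d ∈ l := hsub.subset List.mem_cons_self
    have hr' : List.Subperm r' (l.erase d) := by
      have h1 : List.Perm l (d :: l.erase d) := List.perm_cons_erase hd
      have h2 : List.Subperm (d :: r') (d :: l.erase d) := hsub.trans h1.subperm
      exact (List.subperm_cons d).mp h2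
    simp only [playA]
    split_ifs with h1 h2
    · exact bestB_nonneg k l
    · have hb := ih (l.erase d) (k - d.2) hr'
      have hmem := picksB_of_mem hd
      have := foldB_ge k (picksB l) hmem ⟨by omega, by omega⟩ 0
      rw [bestB_eq]
      calc 1 + playA (k - d.2) r' ≤ 1 + bestB (k - d.2) (l.erase d) := by omega
        _ ≤ _ := this
    · have hr'' : List.Subperm r' l := (List.subperm_cons_self ..).trans hsub
      exact ih l k hr''

-- lower bound: bestB is achieved by some permutation route
theorem bestB_achieved : ∀ (n : Nat) (l : List (Int × Int)) (k : Int), l.length ≤ n →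
    ∃ r, List.Perm r l ∧ bestB k l ≤ playA k r := by
  intro n
  induction n with
  | zero =>
    intro l k hl
    have : l = [] := List.eq_nil_of_length_eq_zero (by omega)
    subst this
    exact ⟨[], List.Perm.refl _, by rw [bestB_eq]; simp [picksB, playA]⟩
  | succ n ih =>
    intro l k hl
    rcases foldB_cases k (picksB l) 0 with h | ⟨p, hp, hc, h⟩
    · exact ⟨l, List.Perm.refl _, by rw [bestB_eq, h]; exact playA_nonneg k l⟩
    · have hlen : p.2.length ≤ n := by have := picksB_length hp; omega
      rcases ih p.2 (k - p.1.2) hlen with ⟨r', hr', hge⟩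
      refine ⟨p.1 :: r', ?_, ?_⟩
      · exact (hr'.cons p.1).trans (picksB_perm hp)
      · rw [bestB_eq, h]
        simp only [playA]
        rw [if_neg (by omega), if_pos (by omega)]
        omega

-- the outer fold over permutations, bounded above and attained
theorem foldMax_le (k c : Int) (L : List (List (Int × Int))) (a : Int)
    (ha : a ≤ c) (hall : ∀ r ∈ L, playA k r ≤ c) :
    L.foldl (fun m r => max m (playA k r)) a ≤ c := by
  induction L generalizing a with
  | nil => simpa using ha
  | cons r L ih =>
    simp only [List.foldl_cons]
    exact ih _ (max_le ha (hall r List.mem_cons_self)) (fun r h => hall r (List.mem_cons_of_mem _ h))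

theorem foldMax_ge (k : Int) (L : List (List (Int × Int)))
    {r : List (Int × Int)} (hr : r ∈ L) :
    ∀ (a : Int), playA k r ≤ L.foldl (fun m r => max m (playA k r)) a := by
  induction L with
  | nil => simp at hr
  | cons q L ih =>
    intro a
    simp only [List.foldl_cons]
    rcases List.mem_cons.mp hr with rfl | hr2
    · have : ∀ (b : Int) (M : List (List (Int × Int))), b ≤ M.foldl (fun m r => max m (playA k r)) b := by
        intro b M
        induction M generalizing b with
        | nil => simp
        | cons q' M ihm => exact le_trans (le_max_left _ _) (ihm _)
      exact le_trans (le_max_right _ _) (this _ L)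
    · exact ih hr2 _

-- ===== VERDICT (by name: the statement is the Claim_ definition above) =====
theorem solution_spec : Claim_equal_solution := by
  intro k dungeons _
  unfold Spec_solution solution solution_alt
  simp only []
  have hsimp : dungeons.permutations.foldl (fun max_value route =>
        max max_value (route.foldl stepA (k, 0, false)).2.1) 0 =
      dungeons.permutations.foldl (fun m r => max m (playA k r)) 0 := by
    apply List.foldl_ext
    intro m r _
    rw [loopA_eq_playA k 0 r]
    simp
  rw [hsimp]
  apply le_antisymm
  · apply foldMax_le k (bestB k dungeons) _ 0 (bestB_nonneg _ _)
    intro r hr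
    exact playA_le_bestB r dungeons k (List.mem_permutations.mp hr).subperm
  · rcases bestB_achieved dungeons.length dungeons k le_rfl with ⟨r, hperm, hge⟩
    exact le_trans hge (foldMax_ge k _ (List.mem_permutations.mpr hperm) 0)
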